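-- pv_equiv track=rewrite | github.com/DAHYUN-HAN/Algorithm_Study | programmers/n_solution.py | solution
-- ===== SOURCE A (Python) =====
-- Alpha = {10:'A', 11:'B', 12:'C', 13:'D', 14:'E', 15:'F'}
--
-- def solution(n, t, m, p):
--     answer = ''
--     now = 0
--     number = ''
--     while(len(number) < t*m):
--         number  = number+ ''.join(get_number(n, now))
--         now += 1
--     if(m == p):
--         p = 0
--     for i in range(len(number)):
--         if((i+1) % m == p):
--             answer += number[i]
--         if(len(answer) == t):
--             break
--     return answer
--
-- def get_number(n, number):
--     number_list = []
--     if(number == 0):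
--         return ['0']
--     while(number != 0):
--         temp = number % n
--         if(temp < 10):
--             number_list.append(str(temp))
--         else:
--             number_list.append(Alpha[temp])
--         number = number // n
--     number_list.reverse()
--     return number_list
-- ===== SOURCE B (Python) =====
-- DIGITS = "0123456789ABCDEF"
--
--
-- def _base_digits(n, num):
--     # base-n representation of num (num >= 0), most significant digit first
--     if num == 0:
--         return "0"
--     s = ""
--     while num != 0:
--         s = DIGITS[num % n] + s
--         num //= n
--     return s
--
--
-- def solution(n, t, m, p):
--     if t <= 0 or m <= 0:
--         return ''
--     if p == m:
--         p = 0
--     answer = []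
--     pos = 0
--     num = 0
--     # stream the digits of 0,1,2,... and keep every digit whose 1-based
--     # position is congruent to p modulo m, until t digits are collected
--     while len(answer) < t and pos < t * m:
--         for ch in _base_digits(n, num):
--             pos += 1
--             if pos % m == p:
--                 answer.append(ch)
--                 if len(answer) == t:
--                     break
--         num += 1
--     return ''.join(answer)
-- ===== Notes on version B (the rewrite author's own statement) =====
-- stated objective: simpler
-- what changed: B streams the base-n digits of 0,1,2,... one number at a time and picks every m-th digit on the fly with a single fused position counter, never materializing the whole t*m-character concatenation that A builds in a separate first pass before its filter pass.
-- outside the precondition, e.g. on solution(-2, 2, 2, 1): A returns '01', B returns '0F'; on solution(-3, -2, -2, -1): A returns '012', B returns ''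
import Mathlib
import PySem

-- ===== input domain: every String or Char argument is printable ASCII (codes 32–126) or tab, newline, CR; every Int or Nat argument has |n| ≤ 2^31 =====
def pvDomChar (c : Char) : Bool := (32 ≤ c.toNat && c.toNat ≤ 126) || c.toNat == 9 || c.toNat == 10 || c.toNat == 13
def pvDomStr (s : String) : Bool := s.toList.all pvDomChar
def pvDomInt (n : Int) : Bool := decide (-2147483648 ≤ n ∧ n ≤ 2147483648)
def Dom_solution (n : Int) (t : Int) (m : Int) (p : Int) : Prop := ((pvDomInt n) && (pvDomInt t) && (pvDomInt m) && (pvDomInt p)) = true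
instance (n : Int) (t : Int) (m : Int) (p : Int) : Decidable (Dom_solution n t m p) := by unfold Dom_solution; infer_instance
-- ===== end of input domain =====

-- B streams the base-n digits of 0,1,2,... and picks every m-th one on the fly,
-- instead of A's build-the-whole-string pass followed by a filter pass (objective: simpler).

-- ===== PORT A =====
-- Alpha[temp]: dict lookup for temp in 10..15; any other key is a Python KeyError (outside Pre_), marked '?'
def alphaGet (temp : Int) : List Char :=
  if temp = 10 then ['A'] else if temp = 11 then ['B'] else if temp = 12 then ['C']
  else if temp = 13 then ['D'] else if temp = 14 then ['E'] else if temp = 15 then ['F']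
  else ['?']

-- the 'while number != 0' loop of get_number; fuel is exhausted only outside Pre_ (n ≤ 1)
def getNumberLoop (n : Int) (number : Int) (acc : List (List Char)) (fuel : Nat) : List (List Char) :=
  match fuel with
  | 0 => acc
  | fuel + 1 =>
    if number = 0 then acc
    else
      let temp := PySem.Int.mod number n
      let d := if temp < 10 then (PySem.Int.toStr temp).toList else alphaGet temp
      getNumberLoop n (PySem.Int.floordiv number n) (acc ++ [d]) fuel

def getNumber (n : Int) (number : Int) : List (List Char) :=
  if number = 0 then [['0']]
  else (getNumberLoop n number [] (number.toNat + 1)).reverse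

-- the 'while len(number) < t*m' loop; fuel is exhausted only outside Pre_
def buildLoop (n : Int) (tm : Int) (now : Int) (number : List Char) (fuel : Nat) : List Char :=
  match fuel with
  | 0 => number
  | fuel + 1 =>
    if (number.length : Int) < tm then
      buildLoop n tm (now + 1) (number ++ (getNumber n now).flatten) fuel
    else number

-- the 'for i in range(len(number))' filter loop with its break
def selectLoop (m : Int) (p : Int) (t : Int) (chars : List Char) (i : Int) (answer : List Char) : List Char :=
  match chars with
  | [] => answer
  | c :: rest =>
    let answer' := if PySem.Int.mod (i + 1) m = p then answer ++ [c] else answer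
    if (answer'.length : Int) = t then answer'
    else selectLoop m p t rest (i + 1) answer'

def solution (n : Int) (t : Int) (m : Int) (p : Int) : String :=
  let number := buildLoop n (t * m) 0 [] ((t * m).toNat + 1)
  let p' := if m = p then 0 else p
  String.ofList (selectLoop m p' t number 0 [])

-- ===== PORT B =====
def digitsList : List Char := "0123456789ABCDEF".toList

-- the 'while num != 0' loop of _base_digits, prepending DIGITS[num % n]; '?' marks Python's IndexError (outside Pre_)
def toBaseLoop (n : Int) (num : Int) (s : List Char) (fuel : Nat) : List Char :=
  match fuel with
  | 0 => s
  | fuel + 1 =>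
    if num = 0 then s
    else toBaseLoop n (PySem.Int.floordiv num n)
      ((PySem.List.pyGet? digitsList (PySem.Int.mod num n)).getD '?' :: s) fuel

def baseDigits (n : Int) (num : Int) : List Char :=
  if num = 0 then ['0'] else toBaseLoop n num [] (num.toNat + 1)

-- the 'for ch in _base_digits(n, num)' loop; returns (pos, answer)
def innerLoop (m : Int) (p : Int) (t : Int) (ds : List Char) (pos : Int) (ans : List Char) : Int × List Char :=
  match ds with
  | [] => (pos, ans)
  | c :: rest =>
    if PySem.Int.mod (pos + 1) m = p then
      let ans' := ans ++ [c]
      if (ans'.length : Int) = t then (pos + 1, ans')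
      else innerLoop m p t rest (pos + 1) ans'
    else innerLoop m p t rest (pos + 1) ans

-- the 'while len(answer) < t and pos < t*m' loop; fuel (t*m)+1 is always enough (pos grows each round)
def outerLoop (n : Int) (t : Int) (m : Int) (p : Int) (num : Int) (pos : Int) (ans : List Char) (fuel : Nat) : List Char :=
  match fuel with
  | 0 => ans
  | fuel + 1 =>
    if (ans.length : Int) < t ∧ pos < t * m then
      let r := innerLoop m p t (baseDigits n num) pos ans
      outerLoop n t m p (num + 1) r.1 r.2 fuel
    else ans

def solution_alt (n : Int) (t : Int) (m : Int) (p : Int) : String :=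
  if t ≤ 0 ∨ m ≤ 0 then ""
  else
    let p' := if p = m then 0 else p
    String.ofList (outerLoop n t m p' 0 0 [] ((t * m).toNat + 1))

-- ===== PRECONDITION & SPEC =====
-- Pre_ admits any input that generates no digit (t*m ≤ 0) and otherwise requires m ≥ 1 and a base for
-- which every generated digit stays below 16 (n ≤ 16, or at most 16 digits requested so only 0..15 occur).
-- It excludes inputs where A's behaviour is accidental: it diverges for n = 1, raises ZeroDivisionError
-- for n = 0 and KeyError for n > 16 once digit 16 is reached, emits multi-character 'digits' like '-1'
-- from str() for n < 0, and filters with a negative modulus when t < 0 ∧ m < 0, an artefact.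
def Pre_solution (n : Int) (t : Int) (m : Int) (p : Int) : Prop :=
  t * m ≤ 0 ∨ (2 ≤ n ∧ 1 ≤ m ∧ (n ≤ 16 ∨ t * m ≤ 16))
instance (n : Int) (t : Int) (m : Int) (p : Int) : Decidable (Pre_solution n t m p) := by
  unfold Pre_solution; infer_instance

def pvWitness_solution : Int × Int × Int × Int := (2, 4, 2, 1)

def Spec_solution (n : Int) (t : Int) (m : Int) (p : Int) (out : String) : Prop := out = solution_alt n t m p
instance (n : Int) (t : Int) (m : Int) (p : Int) (out : String) : Decidable (Spec_solution n t m p out) := by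
  unfold Spec_solution; infer_instance

-- ===== CLAIM (what is proved, stated in full; the proofs are below) =====
def Claim_equal_solution : Prop := ∀ (n : Int) (t : Int) (m : Int) (p : Int), Dom_solution n t m p → Pre_solution n t m p → Spec_solution n t m p (solution n t m p)

-- ===== LEMMAS AND PROOFS =====

-- A's digit string for a remainder d ∈ [0,16) is exactly B's single DIGITS character
lemma digit_eq (d : Int) (h0 : 0 ≤ d) (h16 : d < 16) :
    (if d < 10 then (PySem.Int.toStr d).toList else alphaGet d) =
    [(PySem.List.pyGet? digitsList d).getD '?'] := by
  interval_cases d <;> rfl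

lemma floordiv_nonneg' (a b : Int) (ha : 0 ≤ a) (hb : 0 < b) : 0 ≤ PySem.Int.floordiv a b := by
  rw [PySem.Int.floordiv_eq_ediv_of_pos hb]
  exact Int.ediv_nonneg ha (le_of_lt hb)

-- A's get_number loop (append + reverse + join) equals B's prepend loop, same fuel;
-- the bound keeps every remainder below 16 (small base, or small number in any base)
lemma mod_le_self' (a b : Int) (ha : 0 ≤ a) (hb : 0 < b) : PySem.Int.mod a b ≤ a := by
  have h := PySem.Int.floordiv_mul_add_mod a b
  have hd : 0 ≤ PySem.Int.floordiv a b := floordiv_nonneg' a b ha hb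
  nlinarith

lemma chunk_loop_eq (n : Int) (hn : 2 ≤ n) :
    ∀ (fuel : Nat) (num : Int) (acc : List (List Char)), 0 ≤ num → (n ≤ 16 ∨ num < 16) →
      ((getNumberLoop n num acc fuel).reverse).flatten = toBaseLoop n num (acc.reverse.flatten) fuel := by
  intro fuel
  induction fuel with
  | zero => intro num acc _ _; rfl
  | succ f ih =>
    intro num acc hnum hb
    by_cases h0 : num = 0
    · simp [getNumberLoop, toBaseLoop, h0]
    · have hpos : (0:Int) < n := by omega
      have hmod0 : 0 ≤ PySem.Int.mod num n := PySem.Int.mod_nonneg num hpos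
      have hmodlt : PySem.Int.mod num n < 16 := by
        rcases hb with hb | hb
        · have := PySem.Int.mod_lt num hpos; omega
        · have := mod_le_self' num n hnum hpos; omega
      have hdiv : 0 ≤ PySem.Int.floordiv num n := floordiv_nonneg' num n hnum hpos
      have hdivle : PySem.Int.floordiv num n ≤ num := by
        rw [PySem.Int.floordiv_eq_ediv_of_pos hpos]
        exact Int.ediv_le_self n hnum
      simp only [getNumberLoop, toBaseLoop, h0, if_false]
      rw [ih (PySem.Int.floordiv num n) (acc ++ [_]) hdiv (hb.imp id (by omega))]
      congr 1
      rw [List.reverse_append]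
      simp only [List.reverse_cons, List.reverse_nil, List.nil_append, List.cons_append,
        List.flatten_cons, List.nil_append]
      rw [digit_eq (PySem.Int.mod num n) hmod0 hmodlt]
      rfl

-- joined A chunk = B chunk
lemma chunk_eq (n : Int) (hn : 2 ≤ n) (num : Int) (hnum : 0 ≤ num) (hb : n ≤ 16 ∨ num < 16) :
    (getNumber n num).flatten = baseDigits n num := by
  by_cases h0 : num = 0
  · simp [getNumber, baseDigits, h0]
  · simp only [getNumber, baseDigits, h0, if_false]
    have := chunk_loop_eq n hn (num.toNat + 1) num [] hnum hb
    simpa using this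

-- every chunk is nonempty (get_number always emits at least one digit)
lemma toBaseLoop_len (n : Int) : ∀ (fuel : Nat) (num : Int) (s : List Char),
    s.length ≤ (toBaseLoop n num s fuel).length := by
  intro fuel
  induction fuel with
  | zero => intro num s; exact le_refl _
  | succ f ih =>
    intro num s
    by_cases h0 : num = 0
    · simp [toBaseLoop, h0]
    · simp only [toBaseLoop, h0, if_false]
      calc s.length ≤ (_ :: s).length := by simp
        _ ≤ _ := ih _ _

lemma baseDigits_ne_len (n : Int) (num : Int) : 1 ≤ (baseDigits n num).length := by
  by_cases h0 : num = 0
  · simp [baseDigits, h0]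
  · simp only [baseDigits, h0, if_false]
    have hfuel : ∃ f, num.toNat + 1 = f + 1 := ⟨num.toNat, rfl⟩
    rcases hfuel with ⟨f, hf⟩
    rw [hf]
    simp only [toBaseLoop, h0, if_false]
    calc 1 = ([(PySem.List.pyGet? digitsList (PySem.Int.mod num n)).getD '?'] : List Char).length := rfl
      _ ≤ _ := toBaseLoop_len n f _ _

-- inner loop: the answer never exceeds t, and if it ends below t the position advanced by |ds|
lemma inner_spec (m p t : Int) :
    ∀ (ds : List Char) (pos : Int) (ans : List Char), (ans.length : Int) < t →
      ((((innerLoop m p t ds pos ans).2.length : Int) ≤ t) ∧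
       (((innerLoop m p t ds pos ans).2.length : Int) = t ∨
        (innerLoop m p t ds pos ans).1 = pos + ds.length)) := by
  intro ds
  induction ds with
  | nil => intro pos ans h; simp [innerLoop]; omega
  | cons c rest ih =>
    intro pos ans h
    have hlen : ((ans ++ [c]).length : Int) = (ans.length : Int) + 1 := by simp
    simp only [innerLoop]
    by_cases hc : PySem.Int.mod (pos + 1) m = p
    · rw [if_pos hc]
      by_cases ht : ((ans ++ [c]).length : Int) = t
      · rw [if_pos ht]
        exact ⟨le_of_eq ht, Or.inl ht⟩
      · rw [if_neg ht]
        have hlt : ((ans ++ [c]).length : Int) < t := by omega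
        rcases ih (pos + 1) (ans ++ [c]) hlt with ⟨h1, h2⟩
        refine ⟨h1, ?_⟩
        rcases h2 with h2 | h2
        · exact Or.inl h2
        · refine Or.inr ?_
          rw [h2]
          simp
          omega
    · rw [if_neg hc]
      rcases ih (pos + 1) ans h with ⟨h1, h2⟩
      refine ⟨h1, ?_⟩
      rcases h2 with h2 | h2
      · exact Or.inl h2
      · refine Or.inr ?_
        rw [h2]
        simp
        omega

-- A's filter loop over a concatenation = B's inner loop on the first block, then continue
lemma select_append (m p t : Int) :
    ∀ (ds rest : List Char) (pos : Int) (ans : List Char), (ans.length : Int) < t →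
      selectLoop m p t (ds ++ rest) pos ans =
        (if (((innerLoop m p t ds pos ans).2.length : Int) = t) then (innerLoop m p t ds pos ans).2
         else selectLoop m p t rest (innerLoop m p t ds pos ans).1 (innerLoop m p t ds pos ans).2) := by
  intro ds
  induction ds with
  | nil =>
    intro rest pos ans h
    simp only [List.nil_append, innerLoop]
    rw [if_neg (by omega)]
  | cons c ds' ih =>
    intro rest pos ans h
    have hlen : ((ans ++ [c]).length : Int) = (ans.length : Int) + 1 := by simp
    simp only [List.cons_append, selectLoop, innerLoop]
    by_cases hc : PySem.Int.mod (pos + 1) m = p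
    · rw [if_pos hc, if_pos hc]
      by_cases ht : (((ans ++ [c]).length : Int) = t)
      · rw [if_pos ht, if_pos ht, if_pos ht]
      · rw [if_neg ht, if_neg ht]
        have hlt : ((ans ++ [c]).length : Int) < t := by omega
        exact ih rest (pos + 1) (ans ++ [c]) hlt
    · rw [if_neg hc, if_neg hc, if_neg (by omega : ¬((ans.length : Int) = t))]
      exact ih rest (pos + 1) ans h

-- the tail of A's number string, built from 'now' onwards with the running length 'pos'
def tailBuild (n : Int) (tm : Int) (now : Int) (pos : Int) (fuel : Nat) : List Char :=
  match fuel with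
  | 0 => []
  | fuel + 1 =>
    if pos < tm then
      (getNumber n now).flatten ++
        tailBuild n tm (now + 1) (pos + ((getNumber n now).flatten.length : Int)) fuel
    else []

lemma buildLoop_spec (n tm : Int) :
    ∀ (fuel : Nat) (now : Int) (number : List Char),
      buildLoop n tm now number fuel = number ++ tailBuild n tm now (number.length : Int) fuel := by
  intro fuel
  induction fuel with
  | zero => intro now number; simp [buildLoop, tailBuild]
  | succ f ih =>
    intro now number
    simp only [buildLoop, tailBuild]
    by_cases h : (number.length : Int) < tm
    · simp only [h, if_true]
      rw [ih (now + 1) (number ++ (getNumber n now).flatten)]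
      rw [List.append_assoc]
      congr 2
      simp
    · simp [h]

-- the fused simulation: A's select over the remaining stream = B's outer loop, same fuel;
-- num ≤ pos is the loop invariant (every earlier number contributed at least one digit)
lemma sim (n t m p : Int) (hn : 2 ≤ n) (hcase : n ≤ 16 ∨ t * m ≤ 16) :
    ∀ (fuel : Nat) (num pos : Int) (ans : List Char), 0 ≤ num → num ≤ pos → (ans.length : Int) < t →
      selectLoop m p t (tailBuild n (t * m) num pos fuel) pos ans =
        outerLoop n t m p num pos ans fuel := by
  intro fuel
  induction fuel with
  | zero => intro num pos ans _ _ _; simp [tailBuild, outerLoop, selectLoop]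
  | succ f ih =>
    intro num pos ans hnum hinv hans
    simp only [tailBuild, outerLoop]
    by_cases hp : pos < t * m
    · rw [if_pos hp, if_pos (show (ans.length : Int) < t ∧ pos < t * m from ⟨hans, hp⟩)]
      have hb : n ≤ 16 ∨ num < 16 := hcase.imp id (by omega)
      rw [chunk_eq n hn num hnum hb]
      rw [select_append m p t (baseDigits n num) _ pos ans hans]
      rcases inner_spec m p t (baseDigits n num) pos ans hans with ⟨hle, hor⟩
      by_cases ht : (((innerLoop m p t (baseDigits n num) pos ans).2.length : Int) = t)
      · rw [if_pos ht]
        -- B's while condition is now false; its loop returns the answer whatever fuel is left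
        cases f with
        | zero => rfl
        | succ f' =>
          simp only [outerLoop]
          rw [if_neg (by omega)]
      · rw [if_neg ht]
        have hlt : (((innerLoop m p t (baseDigits n num) pos ans).2.length : Int) < t) := by omega
        have hpos : (innerLoop m p t (baseDigits n num) pos ans).1 =
            pos + ((baseDigits n num).length : Int) := hor.resolve_left ht
        have hone : 1 ≤ ((baseDigits n num).length : Int) := by
          exact_mod_cast baseDigits_ne_len n num
        rw [← hpos]
        exact ih (num + 1) _ _ (by omega) (by omega) hlt
    · rw [if_neg hp, if_neg (show ¬((ans.length : Int) < t ∧ pos < t * m) from fun h => hp h.2)]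
      rfl

-- ===== VERDICT (by name: the statement is the Claim_ definition above) =====
theorem solution_spec : Claim_equal_solution := by
  intro n t m p _hdom hpre
  unfold Spec_solution solution solution_alt
  by_cases htm : t * m ≤ 0
  · -- A builds nothing (its while condition is false at once) and selects over the empty string
    have hfuel : (t * m).toNat = 0 := by omega
    have hb : t ≤ 0 ∨ m ≤ 0 := by
      by_contra h
      simp only [not_or, not_le] at h
      nlinarith [h.1, h.2]
    rw [if_pos hb]
    simp only [hfuel, buildLoop]
    rw [if_neg (show ¬((([] : List Char).length : Int) < t * m) from by simpa using htm)]
    rfl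
  · rcases hpre with h | ⟨hn, hm, hcase⟩
    · omega
    · have ht : 1 ≤ t := by nlinarith
      rw [if_neg (show ¬(t ≤ 0 ∨ m ≤ 0) from by omega)]
      have hb := buildLoop_spec n (t * m) ((t * m).toNat + 1) 0 []
      simp only [List.length_nil, Int.ofNat_zero, List.nil_append] at hb
      rw [hb]
      have hp' : (if m = p then (0:Int) else p) = (if p = m then (0:Int) else p) := by
        by_cases hmp : m = p
        · rw [if_pos hmp, if_pos hmp.symm]
        · rw [if_neg hmp, if_neg (fun hh => hmp hh.symm)]
      rw [hp']
      exact congrArg String.ofList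
        (sim n t m (if p = m then 0 else p) hn hcase ((t * m).toNat + 1) 0 0 [] le_rfl le_rfl
          (by simpa using ht))
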